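-- pv_equiv track=rewrite | github.com/OChacon/CS351Project2 | 351dns.py | hex_to_bin_list
-- ===== SOURCE A (Python) =====
-- def hex_to_bin_list(h_str):
--     bin_list = []
--     bin_list_full = []
--
--     for h in h_str:
--         b = str(bin(int(h, 16)))[2:]
--
--         while len(b) < 4:
--             b = "0" + b
--
--         bin_list.append(b)
--
--     bin_list_len = len(bin_list)
--
--     for i in range(0, bin_list_len, 2):
--         b = bin_list[i]
--
--         if (i + 1) < bin_list_len:
--             b = b + bin_list[i + 1]
--         else:
--             b = "0000" + b
--
--         bin_list_full.append(b)
--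
--     return bin_list_full
-- ===== SOURCE B (Python) =====
-- def hex_to_bin_list(h_str):
--     result = []
--     it = iter(h_str)
--     for c1 in it:
--         c2 = next(it, None)
--         nib1 = format(int(c1, 16), '04b')
--         if c2 is None:
--             result.append('0000' + nib1)
--         else:
--             result.append(nib1 + format(int(c2, 16), '04b'))
--     return result
-- ===== Notes on version B (the rewrite author's own statement) =====
-- stated objective: simpler
-- what changed: Replaces A's two-pass structure (build a list of 4-bit nibble strings via bin()+slicing+a while-padding loop, then regroup it by index over range(0,len,2)) with a single pass that pairs characters from one iterator and formats each with a 4-digit zero-padded binary format call, maintaining no intermediate nibble list.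
import Mathlib
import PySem

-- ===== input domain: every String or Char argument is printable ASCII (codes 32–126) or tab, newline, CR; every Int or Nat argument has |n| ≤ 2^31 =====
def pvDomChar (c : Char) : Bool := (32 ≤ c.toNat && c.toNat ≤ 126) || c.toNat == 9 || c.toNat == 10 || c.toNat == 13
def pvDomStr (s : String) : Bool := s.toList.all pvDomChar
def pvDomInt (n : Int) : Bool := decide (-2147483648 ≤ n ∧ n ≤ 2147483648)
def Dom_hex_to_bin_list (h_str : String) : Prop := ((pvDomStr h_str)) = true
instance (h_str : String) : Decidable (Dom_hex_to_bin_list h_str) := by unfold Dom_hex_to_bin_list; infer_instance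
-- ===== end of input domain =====

-- B replaces A's two-pass build-nibbles-then-regroup structure by a single pass over
-- character pairs (a 4-digit zero-padded binary format per char instead of bin()+slice+while-padding); objective: simpler.


-- ===== PORT A =====
-- the while-loop 'while len(b) < 4: b = "0" + b'; fuel 5 suffices (the loop body runs at most 4 times)
def padWhile (fuel : Nat) (b : List Char) : List Char :=
  match fuel with
  | 0 => b
  | n + 1 => if b.length < 4 then padWhile n ('0' :: b) else b

-- per-character body of A's first loop: b = str(bin(int(h, 16)))[2:] padded to length 4
def nibA (h : Char) : List Char :=
  padWhile 5 (PySem.List.slice (PySem.Int.toBinChars0b ((PySem.Int.ofCharsBase? [h] 16).getD 0)) (some 2) none)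

def hex_to_bin_list (h_str : String) : List String :=
  let bin_list : List (List Char) :=
    h_str.toList.foldl (fun acc h => acc ++ [nibA h]) []
  let bin_list_len : Int := PySem.List.len bin_list
  (PySem.List.pyRange 0 bin_list_len 2).foldl
    (fun acc i =>
      let b := PySem.List.pyGetD bin_list i []
      let b' := if i + 1 < bin_list_len
                then b ++ PySem.List.pyGetD bin_list (i + 1) []
                else ['0', '0', '0', '0'] ++ b
      acc ++ [String.ofList b']) []

-- ===== PORT B =====
-- format(int(c, 16), '04b')
def nibB (c : Char) : List Char :=
  let bits := PySem.Int.toBinChars ((PySem.Int.ofCharsBase? [c] 16).getD 0)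
  List.replicate (4 - bits.length) '0' ++ bits

-- the pairing loop of Source B: consume two characters per iteration
def goB : List Char → List String
  | [] => []
  | [c] => [String.ofList (['0', '0', '0', '0'] ++ nibB c)]
  | c1 :: c2 :: rest => String.ofList (nibB c1 ++ nibB c2) :: goB rest

def hex_to_bin_list_alt (h_str : String) : List String := goB h_str.toList

-- ===== PRECONDITION & SPEC =====
-- Pre_ excludes exactly the strings containing a non-hex-digit character, on which A's
-- int(h, 16) raises ValueError (A returns no value there).
def Pre_hex_to_bin_list (h_str : String) : Prop :=
  (h_str.toList.all (fun c => c ∈ ['0','1','2','3','4','5','6','7','8','9',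
                                   'a','b','c','d','e','f','A','B','C','D','E','F'])) = true
instance (h_str : String) : Decidable (Pre_hex_to_bin_list h_str) := by
  unfold Pre_hex_to_bin_list; infer_instance

def pvWitness_hex_to_bin_list : String := "1aF"

def Spec_hex_to_bin_list (h_str : String) (out : List String) : Prop := out = hex_to_bin_list_alt h_str
instance (h_str : String) (out : List String) : Decidable (Spec_hex_to_bin_list h_str out) := by unfold Spec_hex_to_bin_list; infer_instance

-- ===== CLAIM (what is proved, stated in full; the proofs are below) =====
def Claim_equal_hex_to_bin_list : Prop := ∀ (h_str : String), Dom_hex_to_bin_list h_str → Pre_hex_to_bin_list h_str → Spec_hex_to_bin_list h_str (hex_to_bin_list h_str)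

-- ===== LEMMAS AND PROOFS =====

-- on a hex digit, A's per-character value equals B's
theorem nibA_eq_nibB (c : Char)
    (hc : c ∈ ['0','1','2','3','4','5','6','7','8','9',
               'a','b','c','d','e','f','A','B','C','D','E','F']) :
    nibA c = nibB c := by
  fin_cases hc <;> decide

-- B's pairing on nibble lists, abstracted from nibB
def pairs : List (List Char) → List String
  | [] => []
  | [x] => [String.ofList (['0', '0', '0', '0'] ++ x)]
  | x :: y :: t => String.ofList (x ++ y) :: pairs t

theorem goB_eq_pairs_map (cs : List Char) : goB cs = pairs (cs.map nibB) := by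
  induction cs using goB.induct <;> simp [goB, pairs, *]

theorem pyRange_two_cons (a b : Int) (h : a < b) :
    PySem.List.pyRange a b 2 = a :: PySem.List.pyRange (a + 2) b 2 := by
  rw [PySem.List.pyRange_of_pos _ _ (by norm_num), PySem.List.pyRange_of_pos _ _ (by norm_num)]
  by_cases h2 : a + 2 < b
  · have : ((b - a + 2 - 1) / 2).toNat = ((b - (a + 2) + 2 - 1) / 2).toNat + 1 := by omega
    rw [if_pos h, if_pos h2, this, List.range_succ_eq_map]
    simp [List.map_map, Function.comp]
    intro k _
    ring
  · have : ((b - a + 2 - 1) / 2).toNat = 1 := by omega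
    rw [if_pos h, if_neg h2, this]
    simp

-- A's second loop, over any index j into the full nibble list
theorem loop_eq_pairs (full : List (List Char)) :
    ∀ (t : List (List Char)) (j : Nat) (acc : List String), full.drop j = t →
      (PySem.List.pyRange (j : Int) (PySem.List.len full) 2).foldl
        (fun acc i =>
          let b := PySem.List.pyGetD full i []
          let b' := if i + 1 < PySem.List.len full
                    then b ++ PySem.List.pyGetD full (i + 1) []
                    else ['0', '0', '0', '0'] ++ b
          acc ++ [String.ofList b']) acc = acc ++ pairs t := by
  intro t
  induction t using pairs.induct with
  | case1 =>
      intro j acc hd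
      have hj : full.length ≤ j := by
        by_contra h; exact absurd hd (by simp [List.drop_eq_nil_iff]; omega)
      rw [PySem.List.pyRange_of_pos _ _ (by norm_num),
          if_neg (show ¬((j : Int) < PySem.List.len full) by simp; omega)]
      simp [pairs]
  | case2 x =>
      intro j acc hd
      have hlen : j + 1 = full.length := by
        have := congrArg List.length hd; simp at this; omega
      have hj : (j : Int) < PySem.List.len full := by simp; omega
      rw [pyRange_two_cons _ _ hj, PySem.List.pyRange_of_pos _ _ (by norm_num), if_neg (by simp; omega)]
      have hx : full[j]? = some x := by
        have : (full.drop j)[0]? = some x := by rw [hd]; rfl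
        simpa using this
      simp only [List.foldl_cons, pairs]
      have hget : PySem.List.pyGetD full (j : Int) [] = x := by
        rw [PySem.List.pyGetD_natCast]
        simp [List.getD_eq_getElem?_getD, hx]
      rw [if_neg (by simp; omega), hget]
      simp
  | case3 x y t ih =>
      intro j acc hd
      have hlen : j + 2 ≤ full.length := by
        have := congrArg List.length hd; simp at this; omega
      have hj : (j : Int) < PySem.List.len full := by simp; omega
      have hx : full[j]? = some x := by
        have : (full.drop j)[0]? = some x := by rw [hd]; rfl
        simpa using this
      have hy : full[j + 1]? = some y := by
        have : (full.drop j)[1]? = some y := by rw [hd]; rfl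
        simpa using this
      have hd' : full.drop (j + 2) = t := by
        have : List.drop 2 (full.drop j) = t := by rw [hd]; rfl
        simpa [List.drop_drop, Nat.add_comm] using this
      rw [pyRange_two_cons _ _ hj]
      simp only [List.foldl_cons]
      have hgx : PySem.List.pyGetD full (j : Int) [] = x := by
        rw [PySem.List.pyGetD_natCast]
        simp [List.getD_eq_getElem?_getD, hx]
      have hgy : PySem.List.pyGetD full ((j : Int) + 1) [] = y := by
        rw [show ((j : Int) + 1) = ((j + 1 : Nat) : Int) by push_cast; ring,
            PySem.List.pyGetD_natCast]
        simp [List.getD_eq_getElem?_getD, hy]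
      rw [if_pos (by simp; omega), hgx, hgy]
      have : ((j : Int) + 2) = ((j + 2 : Nat) : Int) := by push_cast; ring
      rw [this, ih (j + 2) _ hd']
      simp [pairs]

-- ===== VERDICT (by name: the statement is the Claim_ definition above) =====
theorem hex_to_bin_list_spec : Claim_equal_hex_to_bin_list := by
  intro h_str _ hpre
  unfold Spec_hex_to_bin_list hex_to_bin_list hex_to_bin_list_alt
  have hmap : h_str.toList.map nibA = h_str.toList.map nibB := by
    refine List.map_congr_left (fun c hc => nibA_eq_nibB c ?_)
    unfold Pre_hex_to_bin_list at hpre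
    rw [List.all_eq_true] at hpre
    simpa using hpre c hc
  have hbin : List.foldl (fun acc h => acc ++ [nibA h]) [] h_str.toList
      = h_str.toList.map nibB := by
    rw [PySem.List.foldl_append_singleton_eq_map, List.nil_append, hmap]
  simp only [hbin]
  have hloop := loop_eq_pairs (h_str.toList.map nibB) (h_str.toList.map nibB) 0 []
    (by simp)
  simp only [Nat.cast_zero, List.nil_append] at hloop
  rw [hloop, goB_eq_pairs_map]
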